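-- pv_equiv track=rewrite | github.com/traian-d/compact_cellular_automata | Topologies.py | rectangular_four_neighbors
-- ===== SOURCE A (Python) =====
-- def rectangular_four_neighbors(n_rows, n_cols):
--     adj_dict = {}
--
--     for i in range(n_rows):
--         for j in range(n_cols):
--             loc = i * n_cols + j
--             if loc not in adj_dict:
--                 adj_dict[loc] = set()
--
--             if i > 0:
--                 adj_dict[loc].add((i - 1) * n_cols + j)
--             if i < n_rows - 1:
--                 adj_dict[loc].add((i + 1) * n_cols + j)
--
--             if j > 0:
--                 adj_dict[loc].add(i * n_cols + j - 1)
--             if j < n_cols - 1: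
--                 adj_dict[loc].add(i * n_cols + j + 1)
--
--     return False, adj_dict
-- ===== SOURCE B (Python) =====
-- def rectangular_four_neighbors(n_rows, n_cols):
--     # Edge-based construction: give every cell an empty set, then sweep the
--     # vertical and horizontal grid edges once each, adding both endpoints.
--     adj_dict = {i * n_cols + j: set() for i in range(n_rows) for j in range(n_cols)}
--     for i in range(n_rows - 1):
--         for j in range(n_cols):
--             a = i * n_cols + j
--             b = a + n_cols
--             adj_dict[a].add(b)
--             adj_dict[b].add(a)
--     for i in range(n_rows):
--         for j in range(n_cols - 1):
--             a = i * n_cols + j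
--             b = a + 1
--             adj_dict[a].add(b)
--             adj_dict[b].add(a)
--     return False, adj_dict
-- ===== Notes on version B (the rewrite author's own statement) =====
-- stated objective: alternative
-- what changed: A visits every cell and adds its up-to-four neighbors with per-cell boundary tests; B instead pre-fills an empty set for every cell and then iterates over the grid's vertical and horizontal EDGES, adding both endpoints of each edge symmetrically, so no boundary conditionals are needed.
import Mathlib
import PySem

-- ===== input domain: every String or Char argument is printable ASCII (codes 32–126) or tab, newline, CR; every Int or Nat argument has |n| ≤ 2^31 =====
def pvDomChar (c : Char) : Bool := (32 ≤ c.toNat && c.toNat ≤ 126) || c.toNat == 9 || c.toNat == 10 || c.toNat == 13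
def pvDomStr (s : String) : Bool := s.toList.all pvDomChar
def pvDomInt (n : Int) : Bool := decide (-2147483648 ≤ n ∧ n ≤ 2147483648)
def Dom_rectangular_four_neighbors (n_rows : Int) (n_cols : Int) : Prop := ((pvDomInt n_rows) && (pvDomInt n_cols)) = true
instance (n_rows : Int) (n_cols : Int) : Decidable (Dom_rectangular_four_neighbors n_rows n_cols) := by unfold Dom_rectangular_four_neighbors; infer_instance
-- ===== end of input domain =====

-- B replaces A's per-cell loop with four boundary tests by an edge sweep: every cell first gets
-- an empty set, then each vertical and each horizontal grid edge adds both its endpoints; objective: alternative.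

-- ===== PORT A =====
-- 'adj_dict[loc].add(x)' is ported as 'modify loc Set.empty (·.add x)': exact here because the
-- preceding guard guarantees loc is a key, so the default is never used (no KeyError is reachable).
def rectangular_four_neighbors (n_rows : Int) (n_cols : Int) : Bool × (List (Int × List Int)) :=
  let adj_dict : PySem.Dict Int (List Int) :=
    (PySem.List.pyRange 0 n_rows 1).foldl (fun adj_dict i =>
      (PySem.List.pyRange 0 n_cols 1).foldl (fun adj_dict j =>
        let loc := i * n_cols + j
        let adj_dict := if adj_dict.contains loc then adj_dict else adj_dict.insert loc PySem.Set.empty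
        let adj_dict := if 0 < i then adj_dict.modify loc PySem.Set.empty (fun s => PySem.Set.add s ((i - 1) * n_cols + j)) else adj_dict
        let adj_dict := if i < n_rows - 1 then adj_dict.modify loc PySem.Set.empty (fun s => PySem.Set.add s ((i + 1) * n_cols + j)) else adj_dict
        let adj_dict := if 0 < j then adj_dict.modify loc PySem.Set.empty (fun s => PySem.Set.add s (i * n_cols + j - 1)) else adj_dict
        let adj_dict := if j < n_cols - 1 then adj_dict.modify loc PySem.Set.empty (fun s => PySem.Set.add s (i * n_cols + j + 1)) else adj_dict
        adj_dict) adj_dict) PySem.Dict.empty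
  (false, adj_dict.items)

-- ===== PORT B =====
-- 'adj_dict[a].add(b)' is ported as 'modify a Set.empty (·.add b)': exact because a and b are always
-- keys of the comprehension-built dict when the edge loops run, so the default is never used.
def rectangular_four_neighbors_alt (n_rows : Int) (n_cols : Int) : Bool × (List (Int × List Int)) :=
  let adj_dict : PySem.Dict Int (List Int) :=
    PySem.Dict.ofList
      ((PySem.List.pyRange 0 n_rows 1).flatMap (fun i =>
        (PySem.List.pyRange 0 n_cols 1).map (fun j => (i * n_cols + j, (PySem.Set.empty : List Int)))))
  let adj_dict :=
    (PySem.List.pyRange 0 (n_rows - 1) 1).foldl (fun adj_dict i =>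
      (PySem.List.pyRange 0 n_cols 1).foldl (fun adj_dict j =>
        let a := i * n_cols + j
        let b := a + n_cols
        let adj_dict := adj_dict.modify a PySem.Set.empty (fun s => PySem.Set.add s b)
        adj_dict.modify b PySem.Set.empty (fun s => PySem.Set.add s a)) adj_dict) adj_dict
  let adj_dict :=
    (PySem.List.pyRange 0 n_rows 1).foldl (fun adj_dict i =>
      (PySem.List.pyRange 0 (n_cols - 1) 1).foldl (fun adj_dict j =>
        let a := i * n_cols + j
        let b := a + 1
        let adj_dict := adj_dict.modify a PySem.Set.empty (fun s => PySem.Set.add s b)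
        adj_dict.modify b PySem.Set.empty (fun s => PySem.Set.add s a)) adj_dict) adj_dict
  (false, adj_dict.items)

-- ===== PRECONDITION & SPEC =====
def Spec_rectangular_four_neighbors (n_rows : Int) (n_cols : Int) (out : Bool × (List (Int × List Int))) : Prop := out = rectangular_four_neighbors_alt n_rows n_cols
instance (n_rows : Int) (n_cols : Int) (out : Bool × (List (Int × List Int))) : Decidable (Spec_rectangular_four_neighbors n_rows n_cols out) := by unfold Spec_rectangular_four_neighbors; infer_instance

-- ===== CLAIM (what is proved, stated in full; the proofs are below) =====
def Claim_equal_rectangular_four_neighbors : Prop := ∀ (n_rows : Int) (n_cols : Int), Dom_rectangular_four_neighbors n_rows n_cols → Spec_rectangular_four_neighbors n_rows n_cols (rectangular_four_neighbors n_rows n_cols)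

-- ===== LEMMAS AND PROOFS =====

-- the grid, cell keys, and the common per-cell neighbour list (up, down, left, right)
def pvKey (n_cols : Int) (p : Int × Int) : Int := p.1 * n_cols + p.2

def pvCells (n_rows n_cols : Int) : List (Int × Int) :=
  (PySem.List.pyRange 0 n_rows 1) ×ˢ (PySem.List.pyRange 0 n_cols 1)

def pvNeighbors (n_rows : Int) (n_cols : Int) (i : Int) (j : Int) : List Int :=
  PySem.Set.ofList
    ((([((i - 1) * n_cols + j, decide (0 < i)),
        ((i + 1) * n_cols + j, decide (i < n_rows - 1)),
        (i * n_cols + j - 1, decide (0 < j)),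
        (i * n_cols + j + 1, decide (j < n_cols - 1))] : List (Int × Bool)).filter
      (fun p => p.2)).map (fun p => p.1))

def pvCand (n_rows n_cols i j : Int) : List Int :=
  (if 0 < i then [(i - 1) * n_cols + j] else []) ++
  (if i < n_rows - 1 then [(i + 1) * n_cols + j] else []) ++
  (if 0 < j then [i * n_cols + j - 1] else []) ++
  (if j < n_cols - 1 then [i * n_cols + j + 1] else [])

-- ---- A side: each cell is visited once with a fresh key, so the loop is a fold of fresh inserts ----

def pvStep (n_rows : Int) (n_cols : Int) (d : PySem.Dict Int (List Int)) (p : Int × Int) : PySem.Dict Int (List Int) :=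
  let i := p.1
  let j := p.2
  let loc := i * n_cols + j
  let d := if d.contains loc then d else d.insert loc PySem.Set.empty
  let d := if 0 < i then d.modify loc PySem.Set.empty (fun s => PySem.Set.add s ((i - 1) * n_cols + j)) else d
  let d := if i < n_rows - 1 then d.modify loc PySem.Set.empty (fun s => PySem.Set.add s ((i + 1) * n_cols + j)) else d
  let d := if 0 < j then d.modify loc PySem.Set.empty (fun s => PySem.Set.add s (i * n_cols + j - 1)) else d
  if j < n_cols - 1 then d.modify loc PySem.Set.empty (fun s => PySem.Set.add s (i * n_cols + j + 1)) else d

lemma pv_modify_insert (d : PySem.Dict Int (List Int)) (k : Int) (v : List Int) (f : List Int → List Int) :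
    (d.insert k v).modify k PySem.Set.empty f = d.insert k (f v) := by
  simp [PySem.Dict.modify, PySem.Dict.getD_insert_self, PySem.Dict.insert_insert_self]

lemma pvStep_eq_insert (n_rows n_cols : Int) (d : PySem.Dict Int (List Int)) (p : Int × Int)
    (hd : d.contains (pvKey n_cols p) = false) :
    pvStep n_rows n_cols d p = d.insert (pvKey n_cols p) (pvNeighbors n_rows n_cols p.1 p.2) := by
  obtain ⟨i, j⟩ := p
  simp only [pvKey] at hd ⊢
  simp only [pvStep]
  by_cases h1 : 0 < i <;> by_cases h2 : i < n_rows - 1 <;> by_cases h3 : 0 < j <;> by_cases h4 : j < n_cols - 1 <;>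
    simp only [h1, h2, h3, h4, if_true, if_false, hd, Bool.false_eq_true, decide_true, decide_false,
      pvNeighbors, List.filter_cons, List.filter_nil, List.map_cons, List.map_nil, pv_modify_insert] <;>
    rfl

lemma pv_foldl_step_eq (n_rows n_cols : Int) :
    ∀ (l : List (Int × Int)) (d : PySem.Dict Int (List Int)),
      (l.map (pvKey n_cols)).Nodup →
      (∀ p ∈ l, d.contains (pvKey n_cols p) = false) →
      l.foldl (pvStep n_rows n_cols) d
        = l.foldl (fun d p => d.insert (pvKey n_cols p) (pvNeighbors n_rows n_cols p.1 p.2)) d := by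
  intro l
  induction l with
  | nil => intro d _ _; rfl
  | cons p t ih =>
    intro d hnd hfresh
    simp only [List.foldl_cons]
    rw [pvStep_eq_insert n_rows n_cols d p (hfresh p (by simp))]
    rw [List.map_cons, List.nodup_cons] at hnd
    refine ih _ hnd.2 ?_
    intro q hq
    rw [PySem.Dict.contains_insert]
    have hne : pvKey n_cols q ≠ pvKey n_cols p := by
      intro h
      exact hnd.1 (h ▸ List.mem_map_of_mem hq)
    simp [hne, hfresh q (List.mem_cons_of_mem _ hq)]

lemma pv_foldl_product {α β δ : Type} (l1 : List α) (l2 : List β) (g : δ → α → β → δ) (init : δ) :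
    l1.foldl (fun d a => l2.foldl (fun d b => g d a b) d) init
      = (l1 ×ˢ l2).foldl (fun d p => g d p.1 p.2) init := by
  induction l1 generalizing init with
  | nil => rfl
  | cons a t ih => simp [List.product_cons, List.foldl_append, List.foldl_map, ih]

lemma pv_key_ne (n : Int) {a b ja jb : Int} (h1 : 0 ≤ ja) (h2 : ja < n) (h3 : 0 ≤ jb) (h4 : jb < n)
    (hne : a ≠ b) : a * n + ja ≠ b * n + jb := by
  intro h
  rcases lt_trichotomy a b with hlt | heq | hgt
  · have : (a + 1) * n ≤ b * n := mul_le_mul_of_nonneg_right (by omega) (by omega)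
    nlinarith
  · exact hne heq
  · have : (b + 1) * n ≤ a * n := mul_le_mul_of_nonneg_right (by omega) (by omega)
    nlinarith

lemma pv_nodup_keys (n_rows n_cols : Int) :
    ((pvCells n_rows n_cols).map (pvKey n_cols)).Nodup := by
  apply List.Nodup.map_on
  · intro p hp q hq hpq
    rw [pvCells, List.mem_product] at hp hq
    have hpj := (PySem.List.mem_pyRange_one).mp hp.2
    have hqj := (PySem.List.mem_pyRange_one).mp hq.2
    simp only [pvKey] at hpq
    have hi : p.1 = q.1 := by
      by_contra hne
      exact pv_key_ne n_cols hpj.1 hpj.2 hqj.1 hqj.2 hne hpq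
    have hj : p.2 = q.2 := by rw [hi] at hpq; linarith
    exact Prod.ext hi hj
  · exact (PySem.List.nodup_pyRange_one 0 n_rows).product (PySem.List.nodup_pyRange_one 0 n_cols)

lemma pv_A_items (n_rows n_cols : Int) :
    rectangular_four_neighbors n_rows n_cols
      = (false, (pvCells n_rows n_cols).map (fun p => (pvKey n_cols p, pvNeighbors n_rows n_cols p.1 p.2))) := by
  unfold rectangular_four_neighbors
  simp only []
  congr 1
  have hA : (PySem.List.pyRange 0 n_rows 1).foldl (fun d i =>
      (PySem.List.pyRange 0 n_cols 1).foldl (fun d j => pvStep n_rows n_cols d (i, j)) d) PySem.Dict.empty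
      = (pvCells n_rows n_cols).foldl (pvStep n_rows n_cols) PySem.Dict.empty :=
    pv_foldl_product _ _ (fun d a b => pvStep n_rows n_cols d (a, b)) _
  show ((PySem.List.pyRange 0 n_rows 1).foldl (fun d i =>
      (PySem.List.pyRange 0 n_cols 1).foldl (fun d j => pvStep n_rows n_cols d (i, j)) d) PySem.Dict.empty).items = _
  rw [hA, pv_foldl_step_eq n_rows n_cols _ _ (pv_nodup_keys n_rows n_cols)
        (by intro q _; exact PySem.Dict.contains_empty _)]
  rw [show (fun (d : PySem.Dict Int (List Int)) (p : Int × Int) =>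
        d.insert (pvKey n_cols p) (pvNeighbors n_rows n_cols p.1 p.2))
      = (fun d p => d.insert (pvKey n_cols p) ((fun q => pvNeighbors n_rows n_cols q.1 q.2) p)) from rfl]
  rw [PySem.Dict.items_foldl_insert_fresh _ _ _ _
        (by intro a _; exact PySem.Dict.contains_empty _) (pv_nodup_keys n_rows n_cols)]
  rw [show (PySem.Dict.empty : PySem.Dict Int (List Int)).items = [] from rfl, List.nil_append]

-- ---- B side: the two edge passes are one fold of 'modify … (add …)' operations over an op list ----

def pvOp (d : PySem.Dict Int (List Int)) (o : Int × Int) : PySem.Dict Int (List Int) :=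
  d.modify o.1 PySem.Set.empty (fun s => PySem.Set.add s o.2)

def pvVOps (n_rows n_cols : Int) : List (Int × Int) :=
  (PySem.List.pyRange 0 (n_rows - 1) 1).flatMap (fun i =>
    (PySem.List.pyRange 0 n_cols 1).flatMap (fun j =>
      [(i * n_cols + j, i * n_cols + j + n_cols), (i * n_cols + j + n_cols, i * n_cols + j)]))

def pvHOps (n_rows n_cols : Int) : List (Int × Int) :=
  (PySem.List.pyRange 0 n_rows 1).flatMap (fun i =>
    (PySem.List.pyRange 0 (n_cols - 1) 1).flatMap (fun j =>
      [(i * n_cols + j, i * n_cols + j + 1), (i * n_cols + j + 1, i * n_cols + j)]))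

def pvD0 (n_rows n_cols : Int) : PySem.Dict Int (List Int) :=
  PySem.Dict.ofList
    ((PySem.List.pyRange 0 n_rows 1).flatMap (fun i =>
      (PySem.List.pyRange 0 n_cols 1).map (fun j => (i * n_cols + j, (PySem.Set.empty : List Int)))))

lemma pv_B_fold (n_rows n_cols : Int) :
    rectangular_four_neighbors_alt n_rows n_cols
      = (false, ((pvVOps n_rows n_cols ++ pvHOps n_rows n_cols).foldl pvOp (pvD0 n_rows n_cols)).items) := by
  unfold rectangular_four_neighbors_alt pvVOps pvHOps pvD0 pvOp
  simp only [List.foldl_append, List.foldl_flatMap, List.foldl_cons, List.foldl_nil]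

lemma pv_keys_map (n_rows n_cols : Int) :
    ((PySem.List.pyRange 0 n_rows 1).flatMap (fun i =>
      (PySem.List.pyRange 0 n_cols 1).map (fun j => (i * n_cols + j, (PySem.Set.empty : List Int))))).map Prod.fst
      = (pvCells n_rows n_cols).map (pvKey n_cols) := by
  simp only [pvCells, SProd.sprod, List.product, List.map_flatMap, List.map_map]
  rfl

lemma pv_D0_keys (n_rows n_cols : Int) :
    (pvD0 n_rows n_cols).keys = (pvCells n_rows n_cols).map (pvKey n_cols) := by
  unfold pvD0
  rw [show ∀ (l : List (Int × List Int)), PySem.Dict.ofList l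
        = l.foldl (fun d a => d.insert a.1 a.2) PySem.Dict.empty from fun _ => rfl]
  rw [PySem.Dict.keys_foldl_insert_key _ Prod.fst (fun _ a => a.2) PySem.Dict.empty]
  rw [PySem.Dict.keys_empty, PySem.Set.update_nil_left, pv_keys_map]
  exact PySem.Set.ofList_eq_self_of_nodup _ (pv_nodup_keys n_rows n_cols)

lemma pv_getD_foldl_insert_empty (c : Int) :
    ∀ (l : List (Int × List Int)), (∀ p ∈ l, p.2 = (PySem.Set.empty : List Int)) →
      ∀ (d : PySem.Dict Int (List Int)), d.getD c PySem.Set.empty = PySem.Set.empty →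
      (l.foldl (fun d a => d.insert a.1 a.2) d).getD c PySem.Set.empty = PySem.Set.empty := by
  intro l
  induction l with
  | nil => intro _ d hd; exact hd
  | cons a t ih =>
    intro hval d hd
    simp only [List.foldl_cons]
    refine ih (fun p hp => hval p (List.mem_cons_of_mem _ hp)) _ ?_
    rw [PySem.Dict.getD_insert]
    by_cases h : c = a.1
    · rw [if_pos h]; exact hval a List.mem_cons_self
    · rw [if_neg h]; exact hd

lemma pv_D0_getD (n_rows n_cols c : Int) :
    (pvD0 n_rows n_cols).getD c PySem.Set.empty = PySem.Set.empty := by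
  unfold pvD0
  rw [show ∀ (l : List (Int × List Int)), PySem.Dict.ofList l
        = l.foldl (fun d a => d.insert a.1 a.2) PySem.Dict.empty from fun _ => rfl]
  refine pv_getD_foldl_insert_empty c _ ?_ _ (PySem.Dict.getD_empty _ _)
  intro p hp
  rw [List.mem_flatMap] at hp
  obtain ⟨i, _, hp⟩ := hp
  rw [List.mem_map] at hp
  obtain ⟨j, _, hp⟩ := hp
  rw [← hp]

lemma pv_cell_mem (n_rows n_cols x y : Int) (hx1 : 0 ≤ x) (hx2 : x < n_rows) (hy1 : 0 ≤ y) (hy2 : y < n_cols) :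
    x * n_cols + y ∈ (pvCells n_rows n_cols).map (pvKey n_cols) :=
  List.mem_map.mpr ⟨(x, y), by
    rw [pvCells, List.mem_product]
    constructor <;> rw [PySem.List.mem_pyRange_one] <;> omega, rfl⟩

lemma pv_ops_keys_mem (n_rows n_cols : Int) :
    ∀ o ∈ pvVOps n_rows n_cols ++ pvHOps n_rows n_cols, o.1 ∈ (pvCells n_rows n_cols).map (pvKey n_cols) := by
  intro o ho
  rw [List.mem_append] at ho
  rcases ho with ho | ho
  · simp only [pvVOps, List.mem_flatMap, List.mem_cons, List.not_mem_nil, or_false] at ho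
    obtain ⟨i, hi, j, hj, ho⟩ := ho
    rw [PySem.List.mem_pyRange_one] at hi hj
    rcases ho with rfl | rfl
    · exact pv_cell_mem n_rows n_cols i j hi.1 (by omega) hj.1 hj.2
    · show i * n_cols + j + n_cols ∈ _
      rw [show i * n_cols + j + n_cols = (i + 1) * n_cols + j from by ring]
      exact pv_cell_mem n_rows n_cols (i + 1) j (by omega) (by omega) hj.1 hj.2
  · simp only [pvHOps, List.mem_flatMap, List.mem_cons, List.not_mem_nil, or_false] at ho
    obtain ⟨i, hi, j, hj, ho⟩ := ho
    rw [PySem.List.mem_pyRange_one] at hi hj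
    rcases ho with rfl | rfl
    · exact pv_cell_mem n_rows n_cols i j hi.1 hi.2 hj.1 (by omega)
    · show i * n_cols + j + 1 ∈ _
      rw [show i * n_cols + j + 1 = i * n_cols + (j + 1) from by ring]
      exact pv_cell_mem n_rows n_cols i (j + 1) hi.1 hi.2 (by omega) (by omega)

lemma pv_final_keys (n_rows n_cols : Int) :
    ((pvVOps n_rows n_cols ++ pvHOps n_rows n_cols).foldl pvOp (pvD0 n_rows n_cols)).keys
      = (pvCells n_rows n_cols).map (pvKey n_cols) := by
  rw [show pvOp = (fun (d : PySem.Dict Int (List Int)) (o : Int × Int) =>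
        d.modify (Prod.fst o) PySem.Set.empty ((fun (_ : PySem.Dict Int (List Int)) (o : Int × Int)
          (s : List Int) => PySem.Set.add s o.2) d o)) from rfl]
  rw [PySem.Dict.keys_foldl_modify_key _ Prod.fst _ _ _]
  rw [pv_D0_keys, PySem.Set.update_eq_append_filter]
  have h : ((PySem.Set.ofList ((pvVOps n_rows n_cols ++ pvHOps n_rows n_cols).map Prod.fst)).filter
      (fun y => !(PySem.Set.contains ((pvCells n_rows n_cols).map (pvKey n_cols)) y))) = [] := by
    rw [List.filter_eq_nil_iff]
    intro y hy
    rw [PySem.Set.mem_ofList, List.mem_map] at hy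
    obtain ⟨o, ho, rfl⟩ := hy
    have := pv_ops_keys_mem n_rows n_cols o ho
    simp [PySem.Set.contains, this]
  rw [h, List.append_nil]

lemma pv_getD_foldl_op (c : Int) :
    ∀ (l : List (Int × Int)) (d : PySem.Dict Int (List Int)),
      (l.foldl pvOp d).getD c PySem.Set.empty
        = ((l.filter (fun o => o.1 == c)).map (fun o => o.2)).foldl PySem.Set.add (d.getD c PySem.Set.empty) := by
  intro l
  induction l with
  | nil => intro d; rfl
  | cons o t ih =>
    intro d
    simp only [List.foldl_cons, List.filter_cons]
    by_cases h : o.1 = c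
    · simp only [h, beq_self_eq_true, if_true, List.map_cons, List.foldl_cons]
      rw [ih]
      congr 1
      show (d.modify o.1 PySem.Set.empty (fun s => PySem.Set.add s o.2)).getD c PySem.Set.empty = _
      rw [PySem.Dict.getD_modify, if_pos (by omega : c = o.1), h]
    · have hb : (o.1 == c) = false := by simp [h]
      simp only [hb]
      rw [ih]
      congr 1
      show (d.modify o.1 PySem.Set.empty (fun s => PySem.Set.add s o.2)).getD c PySem.Set.empty = _
      rw [PySem.Dict.getD_modify, if_neg (fun hc => h hc.symm)]

-- splitting a range around one or two interior points, when the function vanishes elsewhere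
lemma pv_flatMap_single {g : Int → List Int} {a b x : Int} (hax : a ≤ x) (hxb : x < b)
    (h : ∀ y, a ≤ y → y < b → y ≠ x → g y = []) :
    (PySem.List.pyRange a b 1).flatMap g = g x := by
  rw [PySem.List.pyRange_one_append a x b hax (by omega), PySem.List.pyRange_one_cons (by omega : x < b)]
  rw [List.flatMap_append, List.flatMap_cons]
  rw [List.flatMap_eq_nil_iff.mpr (fun y hy => h y ((PySem.List.mem_pyRange_one).mp hy).1
        (by have := ((PySem.List.mem_pyRange_one).mp hy).2; omega) (by have := ((PySem.List.mem_pyRange_one).mp hy).2; omega))]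
  rw [List.flatMap_eq_nil_iff.mpr (fun y hy => h y (by have := ((PySem.List.mem_pyRange_one).mp hy).1; omega)
        ((PySem.List.mem_pyRange_one).mp hy).2 (by have := ((PySem.List.mem_pyRange_one).mp hy).1; omega))]
  simp

lemma pv_flatMap_pair {g : Int → List Int} {a b x y : Int} (hax : a ≤ x) (hxy : x < y) (hyb : y < b)
    (h : ∀ z, a ≤ z → z < b → z ≠ x → z ≠ y → g z = []) :
    (PySem.List.pyRange a b 1).flatMap g = g x ++ g y := by
  rw [PySem.List.pyRange_one_append a y b (by omega) (by omega)]
  rw [List.flatMap_append]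
  rw [pv_flatMap_single (g := g) hax (by omega : x < y)
        (fun z hz1 hz2 hz3 => h z hz1 (by omega) hz3 (by omega))]
  rw [pv_flatMap_single (g := g) (le_refl y) hyb
        (fun z hz1 hz2 hz3 => h z (by omega) hz2 (by omega) hz3)]

-- evaluating a two-element op packet filtered at a fixed key
lemma pv_filter_pair_map (k x1 v1 x2 v2 : Int) :
    (([(x1, v1), (x2, v2)] : List (Int × Int)).filter (fun o => o.1 == k)).map (fun o => o.2)
      = (if x1 = k then [v1] else []) ++ (if x2 = k then [v2] else []) := by
  by_cases h1 : x1 = k <;> by_cases h2 : x2 = k <;> simp [h1, h2]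

def pvVPack (n_cols i j : Int) (i' j' : Int) : List Int :=
  (([(i' * n_cols + j', i' * n_cols + j' + n_cols), (i' * n_cols + j' + n_cols, i' * n_cols + j')]).filter
    (fun o => o.1 == i * n_cols + j)).map (fun o => o.2)

def pvHPack (n_cols i j : Int) (i' j' : Int) : List Int :=
  (([(i' * n_cols + j', i' * n_cols + j' + 1), (i' * n_cols + j' + 1, i' * n_cols + j')]).filter
    (fun o => o.1 == i * n_cols + j)).map (fun o => o.2)

lemma pv_vpack_eq (n_cols i j : Int) (hj1 : 0 ≤ j) (hj2 : j < n_cols) (i' j' : Int)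
    (h1 : 0 ≤ j') (h2 : j' < n_cols) :
    pvVPack n_cols i j i' j'
      = (if i' = i ∧ j' = j then [i * n_cols + j + n_cols] else [])
        ++ (if i' = i - 1 ∧ j' = j then [(i - 1) * n_cols + j] else []) := by
  have hn : 0 < n_cols := by omega
  have hiff1 : i' * n_cols + j' = i * n_cols + j ↔ i' = i ∧ j' = j := by
    constructor
    · intro h
      have hii : i' = i := by by_contra hne; exact pv_key_ne n_cols h1 h2 hj1 hj2 hne h
      exact ⟨hii, by rw [hii] at h; linarith⟩
    · rintro ⟨rfl, rfl⟩; rfl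
  have hiff2 : i' * n_cols + j' + n_cols = i * n_cols + j ↔ i' = i - 1 ∧ j' = j := by
    rw [show i' * n_cols + j' + n_cols = (i' + 1) * n_cols + j' from by ring]
    constructor
    · intro h
      have hii : i' + 1 = i := by by_contra hne; exact pv_key_ne n_cols h1 h2 hj1 hj2 hne h
      exact ⟨by omega, by rw [hii] at h; linarith⟩
    · rintro ⟨h', rfl⟩
      rw [show i' = i - 1 from h']; ring
  rw [pvVPack, pv_filter_pair_map]
  by_cases hA : i' = i ∧ j' = j
  · rw [if_pos (hiff1.mpr hA), if_neg (fun h => by have := (hiff2.mp h).1; omega),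
        if_pos hA, if_neg (fun h => by have h1' := hA.1; have h2' := h.1; omega)]
    rw [hA.1, hA.2]
  · by_cases hB : i' = i - 1 ∧ j' = j
    · rw [if_neg (fun h => hA (hiff1.mp h)), if_pos (hiff2.mpr hB), if_neg hA, if_pos hB]
      rw [hB.1, hB.2]
    · rw [if_neg (fun h => hA (hiff1.mp h)), if_neg (fun h => hB (hiff2.mp h)),
          if_neg hA, if_neg hB]

lemma pv_hpack_eq (n_cols i j : Int) (hj1 : 0 ≤ j) (hj2 : j < n_cols) (i' j' : Int)
    (h1 : 0 ≤ j') (h2 : j' < n_cols - 1) :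
    pvHPack n_cols i j i' j'
      = (if i' = i ∧ j' = j then [i * n_cols + j + 1] else [])
        ++ (if i' = i ∧ j' = j - 1 then [i * n_cols + j - 1] else []) := by
  have hiff1 : i' * n_cols + j' = i * n_cols + j ↔ i' = i ∧ j' = j := by
    constructor
    · intro h
      have hii : i' = i := by by_contra hne; exact pv_key_ne n_cols h1 (by omega) hj1 hj2 hne h
      exact ⟨hii, by rw [hii] at h; linarith⟩
    · rintro ⟨rfl, rfl⟩; rfl
  have hiff2 : i' * n_cols + j' + 1 = i * n_cols + j ↔ i' = i ∧ j' = j - 1 := by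
    rw [show i' * n_cols + j' + 1 = i' * n_cols + (j' + 1) from by ring]
    constructor
    · intro h
      have hii : i' = i := by by_contra hne; exact pv_key_ne n_cols (by omega) (by omega) hj1 hj2 hne h
      exact ⟨hii, by rw [hii] at h; have h2' := add_left_cancel h; omega⟩
    · rintro ⟨rfl, h'⟩
      rw [show j' = j - 1 from h']; ring
  rw [pvHPack, pv_filter_pair_map]
  by_cases hA : i' = i ∧ j' = j
  · rw [if_pos (hiff1.mpr hA), if_neg (fun h => by have hx := (hiff2.mp h).2; have hy := hA.2; omega),
        if_pos hA, if_neg (fun h => by have hx := h.2; have hy := hA.2; omega)]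
    rw [hA.1, hA.2]
  · by_cases hB : i' = i ∧ j' = j - 1
    · rw [if_neg (fun h => hA (hiff1.mp h)), if_pos (hiff2.mpr hB), if_neg hA, if_pos hB]
      rw [hB.1, hB.2]
      congr 1
      ring_nf
    · rw [if_neg (fun h => hA (hiff1.mp h)), if_neg (fun h => hB (hiff2.mp h)),
          if_neg hA, if_neg hB]

lemma pv_vfilter (n_rows n_cols i j : Int) (hi1 : 0 ≤ i) (hi2 : i < n_rows) (hj1 : 0 ≤ j) (hj2 : j < n_cols) :
    (((pvVOps n_rows n_cols).filter (fun o => o.1 == i * n_cols + j)).map (fun o => o.2))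
      = (if 0 < i then [(i - 1) * n_cols + j] else []) ++ (if i < n_rows - 1 then [(i + 1) * n_cols + j] else []) := by
  have hinner : ∀ i',
      (PySem.List.pyRange 0 n_cols 1).flatMap (fun j' => pvVPack n_cols i j i' j')
        = (if i' = i then [i * n_cols + j + n_cols] else [])
          ++ (if i' = i - 1 then [(i - 1) * n_cols + j] else []) := by
    intro i'
    rw [pv_flatMap_single (x := j) hj1 hj2 (fun y h1 h2 h3 => by
      rw [pv_vpack_eq n_cols i j hj1 hj2 i' y h1 h2]; simp [h3])]
    rw [pv_vpack_eq n_cols i j hj1 hj2 i' j hj1 hj2]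
    by_cases h1 : i' = i <;> by_cases h2 : i' = i - 1 <;> simp [h1, h2]
  have hops : ((pvVOps n_rows n_cols).filter (fun o => o.1 == i * n_cols + j)).map (fun o => o.2)
      = (PySem.List.pyRange 0 (n_rows - 1) 1).flatMap (fun i' =>
          (PySem.List.pyRange 0 n_cols 1).flatMap (fun j' => pvVPack n_cols i j i' j')) := by
    simp only [pvVOps, pvVPack, List.filter_flatMap, List.map_flatMap]
  rw [hops]
  by_cases hi0 : 0 < i
  · by_cases hiR : i < n_rows - 1
    · rw [pv_flatMap_pair (x := i - 1) (y := i) (by omega) (by omega) (by omega)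
          (fun z h1 h2 h3 h4 => by rw [hinner z]; simp [h3, h4])]
      rw [hinner (i - 1), hinner i]
      simp [show ¬ ((i : Int) - 1 = i) from by omega, show ¬ ((i : Int) = i - 1) from by omega, hi0, hiR,
        show i * n_cols + j + n_cols = (i + 1) * n_cols + j from by ring]
    · rw [pv_flatMap_single (x := i - 1) (by omega) (by omega)
          (fun z h1 h2 h3 => by rw [hinner z]; simp [h3, show ¬ (z = i) from by omega])]
      rw [hinner (i - 1)]
      simp [show ¬ ((i : Int) - 1 = i) from by omega, hi0, hiR]
  · by_cases hiR : i < n_rows - 1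
    · rw [pv_flatMap_single (x := i) (by omega) (by omega)
          (fun z h1 h2 h3 => by rw [hinner z]; simp [h3, show ¬ (z = i - 1) from by omega])]
      rw [hinner i]
      simp [show ¬ ((i : Int) = i - 1) from by omega, hi0, hiR,
        show i * n_cols + j + n_cols = (i + 1) * n_cols + j from by ring]
    · rw [PySem.List.pyRange_one_eq_nil (by omega : n_rows - 1 ≤ 0)]
      simp [hi0, hiR]

lemma pv_hfilter (n_rows n_cols i j : Int) (hi1 : 0 ≤ i) (hi2 : i < n_rows) (hj1 : 0 ≤ j) (hj2 : j < n_cols) :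
    (((pvHOps n_rows n_cols).filter (fun o => o.1 == i * n_cols + j)).map (fun o => o.2))
      = (if 0 < j then [i * n_cols + j - 1] else []) ++ (if j < n_cols - 1 then [i * n_cols + j + 1] else []) := by
  have hinner : (PySem.List.pyRange 0 (n_cols - 1) 1).flatMap (fun j' => pvHPack n_cols i j i j')
      = (if 0 < j then [i * n_cols + j - 1] else []) ++ (if j < n_cols - 1 then [i * n_cols + j + 1] else []) := by
    by_cases hj0 : 0 < j
    · by_cases hjn : j < n_cols - 1
      · rw [pv_flatMap_pair (x := j - 1) (y := j) (by omega) (by omega) (by omega)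
            (fun z h1 h2 h3 h4 => by
              rw [pv_hpack_eq n_cols i j hj1 hj2 i z h1 h2]
              simp [h4, show ¬ (z = j - 1) from by omega])]
        rw [pv_hpack_eq n_cols i j hj1 hj2 i (j - 1) (by omega) (by omega),
            pv_hpack_eq n_cols i j hj1 hj2 i j (by omega) (by omega)]
        simp [show ¬ ((j : Int) - 1 = j) from by omega, show ¬ ((j : Int) = j - 1) from by omega, hj0, hjn]
      · rw [pv_flatMap_single (x := j - 1) (by omega) (by omega)
            (fun z h1 h2 h3 => by
              rw [pv_hpack_eq n_cols i j hj1 hj2 i z h1 h2]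
              simp [h3, show ¬ (z = j) from by omega])]
        rw [pv_hpack_eq n_cols i j hj1 hj2 i (j - 1) (by omega) (by omega)]
        simp [show ¬ ((j : Int) - 1 = j) from by omega, hj0, hjn]
    · by_cases hjn : j < n_cols - 1
      · rw [pv_flatMap_single (x := j) (by omega) (by omega)
            (fun z h1 h2 h3 => by
              rw [pv_hpack_eq n_cols i j hj1 hj2 i z h1 h2]
              simp [h3, show ¬ (z = j - 1) from by omega])]
        rw [pv_hpack_eq n_cols i j hj1 hj2 i j (by omega) (by omega)]
        simp [show ¬ ((j : Int) = j - 1) from by omega, hj0, hjn]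
      · rw [PySem.List.pyRange_one_eq_nil (by omega : n_cols - 1 ≤ 0)]
        simp [hj0, hjn]
  have hrow_ne : ∀ i', i' ≠ i →
      (PySem.List.pyRange 0 (n_cols - 1) 1).flatMap (fun j' => pvHPack n_cols i j i' j') = [] := by
    intro i' hne
    refine List.flatMap_eq_nil_iff.mpr (fun j' hj' => ?_)
    have hb := (PySem.List.mem_pyRange_one).mp hj'
    rw [pv_hpack_eq n_cols i j hj1 hj2 i' j' hb.1 hb.2]
    simp [hne]
  have hops : ((pvHOps n_rows n_cols).filter (fun o => o.1 == i * n_cols + j)).map (fun o => o.2)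
      = (PySem.List.pyRange 0 n_rows 1).flatMap (fun i' =>
          (PySem.List.pyRange 0 (n_cols - 1) 1).flatMap (fun j' => pvHPack n_cols i j i' j')) := by
    simp only [pvHOps, pvHPack, List.filter_flatMap, List.map_flatMap]
  rw [hops]
  rw [pv_flatMap_single (x := i) hi1 hi2 (fun z h1 h2 h3 => hrow_ne z h3)]
  exact hinner

lemma pv_cand_eq_neighbors (n_rows n_cols i j : Int) :
    PySem.Set.ofList (pvCand n_rows n_cols i j) = pvNeighbors n_rows n_cols i j := by
  unfold pvCand pvNeighbors
  congr 1
  by_cases h1 : 0 < i <;> by_cases h2 : i < n_rows - 1 <;> by_cases h3 : 0 < j <;> by_cases h4 : j < n_cols - 1 <;>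
    simp [h1, h2, h3, h4]

lemma pv_B_items (n_rows n_cols : Int) :
    rectangular_four_neighbors_alt n_rows n_cols
      = (false, (pvCells n_rows n_cols).map (fun p => (pvKey n_cols p, pvNeighbors n_rows n_cols p.1 p.2))) := by
  rw [pv_B_fold]
  congr 1
  set dfin := (pvVOps n_rows n_cols ++ pvHOps n_rows n_cols).foldl pvOp (pvD0 n_rows n_cols) with hdfin
  have hkeys : dfin.keys = (pvCells n_rows n_cols).map (pvKey n_cols) := pv_final_keys n_rows n_cols
  rw [PySem.Dict.items_eq_map_keys dfin (hkeys ▸ pv_nodup_keys n_rows n_cols) PySem.Set.empty]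
  rw [hkeys, List.map_map]
  refine List.map_congr_left (fun p hp => ?_)
  rw [pvCells, List.mem_product] at hp
  have hpi := (PySem.List.mem_pyRange_one).mp hp.1
  have hpj := (PySem.List.mem_pyRange_one).mp hp.2
  show (pvKey n_cols p, dfin.getD (pvKey n_cols p) PySem.Set.empty) = _
  congr 1
  rw [hdfin, pv_getD_foldl_op, pv_D0_getD]
  rw [List.filter_append, List.map_append]
  show ((((pvVOps n_rows n_cols).filter (fun o => o.1 == p.1 * n_cols + p.2)).map (fun o => o.2)) ++
        (((pvHOps n_rows n_cols).filter (fun o => o.1 == p.1 * n_cols + p.2)).map (fun o => o.2))).foldl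
          PySem.Set.add PySem.Set.empty = _
  rw [pv_vfilter n_rows n_cols p.1 p.2 hpi.1 hpi.2 hpj.1 hpj.2,
      pv_hfilter n_rows n_cols p.1 p.2 hpi.1 hpi.2 hpj.1 hpj.2]
  rw [← pv_cand_eq_neighbors n_rows n_cols p.1 p.2]
  rw [PySem.Set.ofList_eq_foldl]
  unfold pvCand
  simp [List.append_assoc]

-- ===== VERDICT (by name: the statement is the Claim_ definition above) =====
theorem rectangular_four_neighbors_spec : Claim_equal_rectangular_four_neighbors := by
  intro n_rows n_cols _
  unfold Spec_rectangular_four_neighbors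
  rw [pv_A_items, pv_B_items]
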